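-- pv_equiv track=rewrite | github.com/academic-resources/stared-repos | python-skytools/skytools/parsing.py | dedent
-- ===== SOURCE A (Python) =====
-- from typing import Iterator, List, Optional, Sequence, Tuple
--
-- def dedent(doc: str) -> str:
--     r"""Relaxed dedent.
--
--     - takes whitespace to be removed from first indented line.
--     - allows empty or non-indented lines at the start
--     - allows first line to be unindented
--     - skips empty lines at the start
--     - ignores indent of empty lines
--     - if line does not match common indent, is stays unchanged
--     """
--     pfx: Optional[str] = None
--     res: List[str] = []
--     for ln in doc.splitlines():
--         ln = ln.rstrip()
--         if not pfx and len(res) < 2: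
--             if not ln:
--                 continue
--             wslen = len(ln) - len(ln.lstrip())
--             pfx = ln[: wslen]
--         if pfx:
--             if ln.startswith(pfx):
--                 ln = ln[len(pfx):]
--         res.append(ln)
--     res.append('')
--     return '\n'.join(res)
-- ===== SOURCE B (Python) =====
-- def _strip(pfx, ln):
--     return ln[len(pfx):] if ln.startswith(pfx) else ln
--
-- def dedent(doc: str) -> str:
--     # Phase 1: rstrip all lines, skip leading blanks, derive prefix from the
--     # first content line (or the second, if the first is unindented).
--     lines = [ln.rstrip() for ln in doc.splitlines()]
--     while lines and not lines[0]:
--         lines = lines[1:]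
--     if not lines:
--         return ''
--     first = lines[0]
--     pfx = first[:len(first) - len(first.lstrip())]
--     if pfx:
--         out = [_strip(pfx, ln) for ln in lines]
--     else:
--         rest = lines[1:]
--         while rest and not rest[0]:
--             rest = rest[1:]
--         if not rest:
--             out = [first]
--         else:
--             second = rest[0]
--             pfx2 = second[:len(second) - len(second.lstrip())]
--             if pfx2:
--                 out = [first] + [_strip(pfx2, ln) for ln in rest]
--             else:
--                 out = [first] + rest
--     # Phase 2: join with trailing newline.
--     return '\n'.join(out + [''])
-- ===== Notes on version B (the rewrite author's own statement) =====
-- stated objective: alternative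
-- what changed: Replaces A's single fold that threads an Optional prefix and a growing result list (re-deriving the prefix mid-loop) with a two-phase decomposition: first locate the prefix window (skip leading blanks, take the first content line's indent, falling back to the second content line when the first is unindented), then strip the prefix from the remaining lines in one map and join.
import Mathlib
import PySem

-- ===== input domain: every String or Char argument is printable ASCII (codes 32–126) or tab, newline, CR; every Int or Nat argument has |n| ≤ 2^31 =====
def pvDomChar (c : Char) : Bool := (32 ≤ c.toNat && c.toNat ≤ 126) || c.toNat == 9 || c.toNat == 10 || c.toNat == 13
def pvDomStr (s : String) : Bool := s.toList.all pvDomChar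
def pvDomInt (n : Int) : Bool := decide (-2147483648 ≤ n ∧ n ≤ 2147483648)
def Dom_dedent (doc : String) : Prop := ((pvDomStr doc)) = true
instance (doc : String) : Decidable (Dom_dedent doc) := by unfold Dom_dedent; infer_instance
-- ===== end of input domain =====

-- B restates A's single stateful loop as two phases (find the prefix window, then strip);
-- objective: simpler/alternative decomposition, same results.

-- ===== PORT A =====
-- ln[:wslen] where wslen = len(ln) - len(ln.lstrip())
def aPfx (ln : String) : String :=
  PySem.Str.slice ln none (some (PySem.Str.len ln - PySem.Str.len (PySem.Str.lstrip ln)))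

-- 'if pfx: if ln.startswith(pfx): ln = ln[len(pfx):]'
def aStrip (pfx ln : String) : String :=
  if pfx ≠ "" ∧ PySem.Str.startswith ln pfx then PySem.Str.slice ln (some (PySem.Str.len pfx)) none else ln

-- one iteration of A's loop body, on the already-rstripped line
def stepA (st : Option String × List String) (ln : String) : Option String × List String :=
  if (st.1.getD "" = "") ∧ st.2.length < 2 then      -- 'not pfx and len(res) < 2' (None or '')
    if ln = "" then st                                -- 'continue'
    else
      let pfx := aPfx ln
      (some pfx, st.2 ++ [aStrip pfx ln])
  else
    (st.1, st.2 ++ [match st.1 with | some p => aStrip p ln | none => ln])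

def dedent (doc : String) : String :=
  let st := (PySem.Str.splitlines doc).foldl (fun st ln => stepA st (PySem.Str.rstrip ln)) (none, [])
  PySem.Str.join "\n" (st.2 ++ [""])

-- ===== PORT B =====
def bPfx (ln : String) : String :=
  PySem.Str.slice ln none (some (PySem.Str.len ln - PySem.Str.len (PySem.Str.lstrip ln)))

def bStrip (pfx ln : String) : String :=
  if PySem.Str.startswith ln pfx then PySem.Str.slice ln (some (PySem.Str.len pfx)) none else ln

-- 'while lines and not lines[0]: lines = lines[1:]'
def skipBlank : List String → List String
  | [] => []
  | h :: t => if h = "" then skipBlank t else h :: t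

-- phases 1 and 2 on the rstripped lines
def altCore (lines : List String) : String :=
  match skipBlank lines with
  | [] => ""
  | first :: restAll =>
    let p := bPfx first
    let out :=
      if p ≠ "" then (first :: restAll).map (bStrip p)
      else
        match skipBlank restAll with
        | [] => [first]
        | second :: rest2 =>
          let p2 := bPfx second
          if p2 ≠ "" then first :: (second :: rest2).map (bStrip p2)
          else first :: second :: rest2
    PySem.Str.join "\n" (out ++ [""])

def dedent_alt (doc : String) : String :=
  altCore ((PySem.Str.splitlines doc).map PySem.Str.rstrip)

-- ===== PRECONDITION & SPEC =====
def Spec_dedent (doc : String) (out : String) : Prop := out = dedent_alt doc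
instance (doc : String) (out : String) : Decidable (Spec_dedent doc out) := by unfold Spec_dedent; infer_instance

-- ===== CLAIM (what is proved, stated in full; the proofs are below) =====
def Claim_equal_dedent : Prop := ∀ (doc : String), Dom_dedent doc → Spec_dedent doc (dedent doc)

-- ===== LEMMAS AND PROOFS =====

lemma skipBlank_head_ne {M : List String} {h : String} {t : List String}
    (hsk : skipBlank M = h :: t) : h ≠ "" := by
  induction M with
  | nil => simp [skipBlank] at hsk
  | cons x xs ih =>
    by_cases hx : x = ""
    · exact ih (by simpa [skipBlank, hx] using hsk)
    · simp [skipBlank, hx] at hsk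
      exact hsk.1 ▸ hx

lemma aStrip_eq_bStrip {p : String} (hp : p ≠ "") (ln : String) :
    aStrip p ln = bStrip p ln := by
  simp [aStrip, bStrip, hp]

-- skipping blank lines while 'not pfx and len(res) < 2'
lemma foldl_skipBlank (st : Option String × List String)
    (h1 : st.1.getD "" = "") (h2 : st.2.length < 2) (M : List String) :
    M.foldl stepA st = (skipBlank M).foldl stepA st := by
  induction M with
  | nil => rfl
  | cons x xs ih =>
    by_cases hx : x = ""
    · subst hx
      have : stepA st "" = st := by simp [stepA, h1, h2]
      simp [skipBlank, List.foldl_cons, this, ih]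
    · simp [skipBlank, hx]

-- with a nonempty prefix fixed, the loop just strips every remaining line
lemma foldl_fixed (p : String) (hp : p ≠ "") (M : List String) :
    ∀ res : List String,
      M.foldl stepA (some p, res) = (some p, res ++ M.map (bStrip p)) := by
  induction M with
  | nil => intro res; simp
  | cons x xs ih =>
    intro res
    have hstep : stepA (some p, res) x = (some p, res ++ [bStrip p x]) := by
      simp [stepA, hp, aStrip_eq_bStrip hp]
    simp [List.foldl_cons, hstep, ih]

-- with pfx == '' and two lines already collected, the loop copies lines unchanged
lemma foldl_empty_pfx (M : List String) :
    ∀ res : List String, 2 ≤ res.length →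
      M.foldl stepA (some "", res) = (some "", res ++ M) := by
  induction M with
  | nil => intro res _; simp
  | cons x xs ih =>
    intro res hres
    have hcond : ¬ ((((some "" : Option String).getD "" = "")) ∧ (res.length < 2)) := by
      simp only [Option.getD_some, true_and]; omega
    have hstep : stepA (some "", res) x = (some "", res ++ [x]) := by
      simp only [stepA, hcond, if_false, aStrip, ne_eq, not_true_eq_false, false_and]
    rw [List.foldl_cons, hstep, ih (res ++ [x]) (by simp; omega)]
    simp

lemma core_eq (M : List String) :
    PySem.Str.join "\n" ((M.foldl stepA (none, [])).2 ++ [""]) = altCore M := by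
  rw [foldl_skipBlank (none, []) rfl (by simp) M]
  rcases hsk : skipBlank M with _ | ⟨f, rest⟩
  · simp [altCore, hsk]
    decide
  · have hf : f ≠ "" := skipBlank_head_ne hsk
    by_cases hp : aPfx f = ""
    · -- first content line unindented: window stays open
      have h1 : stepA (none, ([] : List String)) f = (some "", [f]) := by
        simp [stepA, hf, hp, aStrip]
      rw [List.foldl_cons, h1, foldl_skipBlank (some "", [f]) rfl (by simp) rest]
      rcases hsk2 : skipBlank rest with _ | ⟨g, rest2⟩
      · simp [altCore, hsk, hsk2, bPfx, aPfx] at *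
        simp [hp]
      · have hg : g ≠ "" := skipBlank_head_ne hsk2
        by_cases hp2 : aPfx g = ""
        · -- second content line unindented too: nothing is ever stripped
          have h2 : stepA (some "", [f]) g = (some "", [f, g]) := by
            simp [stepA, hg, hp2, aStrip]
          rw [List.foldl_cons, h2, foldl_empty_pfx rest2 [f, g] (by simp)]
          simp [altCore, hsk, hsk2, bPfx]
          simp [aPfx] at hp hp2
          simp [hp, hp2]
        · -- prefix re-derived from the second content line
          have h2 : stepA (some "", [f]) g = (some (aPfx g), [f, bStrip (aPfx g) g]) := by
            simp [stepA, hg, aStrip_eq_bStrip hp2]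
          rw [List.foldl_cons, h2, foldl_fixed (aPfx g) hp2 rest2 [f, bStrip (aPfx g) g]]
          simp [altCore, hsk, hsk2, bPfx]
          simp [aPfx] at hp hp2 ⊢
          simp [hp, hp2]
    · -- prefix taken from the first content line
      have h1 : stepA (none, ([] : List String)) f = (some (aPfx f), [bStrip (aPfx f) f]) := by
        simp [stepA, hf, aStrip_eq_bStrip hp]
      rw [List.foldl_cons, h1, foldl_fixed (aPfx f) hp rest [bStrip (aPfx f) f]]
      simp [altCore, hsk, bPfx]
      simp [aPfx] at hp ⊢
      simp [hp]

-- ===== VERDICT (by name: the statement is the Claim_ definition above) =====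
theorem dedent_spec : Claim_equal_dedent := by
  intro doc _
  show dedent doc = dedent_alt doc
  have h : (PySem.Str.splitlines doc).foldl (fun st ln => stepA st (PySem.Str.rstrip ln)) (none, []) = ((PySem.Str.splitlines doc).map PySem.Str.rstrip).foldl stepA (none, []) := List.foldl_map.symm
  simp only [dedent, dedent_alt, h]
  exact core_eq _
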